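-- pv_equiv track=rewrite | github.com/nemasha200/Weather_Prediction_System-ML- | weather_app.py | crop_buckets
-- ===== SOURCE A (Python) =====
-- def crop_buckets(decisions_or_dict: dict) -> dict:
--     """Split crops list into buckets for UI."""
--     crops = decisions_or_dict.get("crops", [])
--     cats = {"Rice": [], "Vegetables": [], "Fruits": [], "Spices/Roots": [], "Other": []}
--     for c in crops:
--         name = c.lower()
--         if "paddy" in name or "rice" in name: cats["Rice"].append(c)
--         elif any(k in name for k in ["okra","bean","cucumber","chili","eggplant","brinjal","cowpea","leafy","spinach","kangkung","lady"]):
--             cats["Vegetables"].append(c)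
--         elif any(k in name for k in ["banana","plantain","fruit"]):
--             cats["Fruits"].append(c)
--         elif any(k in name for k in ["cassava","taro","arbi"]):
--             cats["Spices/Roots"].append(c)
--         else:
--             cats["Other"].append(c)
--     return cats
-- ===== SOURCE B (Python) =====
-- KEYWORD_TABLE = [
--     ("Rice", ["paddy", "rice"]),
--     ("Vegetables", ["okra","bean","cucumber","chili","eggplant","brinjal","cowpea","leafy","spinach","kangkung","lady"]),
--     ("Fruits", ["banana","plantain","fruit"]),
--     ("Spices/Roots", ["cassava","taro","arbi"]),
-- ]
--
-- def _classify(c):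
--     name = c.lower()
--     for cat, kws in KEYWORD_TABLE:
--         if any(k in name for k in kws):
--             return cat
--     return "Other"
--
-- def crop_buckets(decisions_or_dict: dict) -> dict:
--     """Split crops list into buckets for UI."""
--     crops = decisions_or_dict.get("crops", [])
--     return {cat: [c for c in crops if _classify(c) == cat]
--             for cat in ["Rice", "Vegetables", "Fruits", "Spices/Roots", "Other"]}
-- ===== Notes on version B (the rewrite author's own statement) =====
-- stated objective: idiomatic
-- what changed: Replaces the single-pass five-branch if/elif chain that appends into a mutable dict with an ordered keyword table plus a _classify helper, building the result as a dict comprehension with one filter pass per category.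
import Mathlib
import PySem

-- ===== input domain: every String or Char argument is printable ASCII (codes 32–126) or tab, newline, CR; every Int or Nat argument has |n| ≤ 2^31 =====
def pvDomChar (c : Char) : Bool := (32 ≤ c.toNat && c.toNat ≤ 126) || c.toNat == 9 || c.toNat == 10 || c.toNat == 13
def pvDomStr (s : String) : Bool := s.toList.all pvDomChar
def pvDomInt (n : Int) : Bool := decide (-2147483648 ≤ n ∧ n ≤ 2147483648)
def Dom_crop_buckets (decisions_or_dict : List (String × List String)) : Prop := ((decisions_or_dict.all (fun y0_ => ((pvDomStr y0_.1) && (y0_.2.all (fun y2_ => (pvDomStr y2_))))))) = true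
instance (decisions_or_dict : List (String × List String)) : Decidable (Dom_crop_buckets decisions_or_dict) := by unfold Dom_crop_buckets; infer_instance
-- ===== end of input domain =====

-- B buckets crops with an ordered keyword table and one filter pass per category,
-- instead of A's single pass with a five-branch if/elif chain appending into a dict (objective: idiomatic).

-- ===== PORT A =====
-- one step of A's loop body: the five-branch if/elif chain appending c into cats
def cbStepA (cats : PySem.Dict String (List String)) (c : String) : PySem.Dict String (List String) :=
  let name := PySem.Str.lower c
  if PySem.Str.isIn "paddy" name || PySem.Str.isIn "rice" name then
    cats.modify "Rice" [] (· ++ [c])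
  else if (["okra","bean","cucumber","chili","eggplant","brinjal","cowpea","leafy","spinach","kangkung","lady"].any
      (fun k => PySem.Str.isIn k name)) then
    cats.modify "Vegetables" [] (· ++ [c])
  else if (["banana","plantain","fruit"].any (fun k => PySem.Str.isIn k name)) then
    cats.modify "Fruits" [] (· ++ [c])
  else if (["cassava","taro","arbi"].any (fun k => PySem.Str.isIn k name)) then
    cats.modify "Spices/Roots" [] (· ++ [c])
  else
    cats.modify "Other" [] (· ++ [c])

def crop_buckets (decisions_or_dict : List (String × List String)) : List (String × List String) :=
  let crops := (PySem.Dict.ofList decisions_or_dict).getD "crops" []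
  let cats : PySem.Dict String (List String) :=
    PySem.Dict.ofList [("Rice", []), ("Vegetables", []), ("Fruits", []), ("Spices/Roots", []), ("Other", [])]
  (crops.foldl cbStepA cats).items

-- ===== PORT B =====
def cbKwTable : List (String × List String) :=
  [("Rice", ["paddy", "rice"]),
   ("Vegetables", ["okra","bean","cucumber","chili","eggplant","brinjal","cowpea","leafy","spinach","kangkung","lady"]),
   ("Fruits", ["banana","plantain","fruit"]),
   ("Spices/Roots", ["cassava","taro","arbi"])]

-- B's helper _classify: first category of the table with a substring match, else "Other"
def cbClassify (c : String) : String :=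
  let name := PySem.Str.lower c
  match cbKwTable.find? (fun p => p.2.any (fun k => PySem.Str.isIn k name)) with
  | some p => p.1
  | none => "Other"

def crop_buckets_alt (decisions_or_dict : List (String × List String)) : List (String × List String) :=
  let crops := (PySem.Dict.ofList decisions_or_dict).getD "crops" []
  ["Rice", "Vegetables", "Fruits", "Spices/Roots", "Other"].map
    (fun cat => (cat, crops.filter (fun c => cbClassify c == cat)))

-- ===== PRECONDITION & SPEC =====
def Spec_crop_buckets (decisions_or_dict : List (String × List String)) (out : List (String × List String)) : Prop := out = crop_buckets_alt decisions_or_dict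
instance (decisions_or_dict : List (String × List String)) (out : List (String × List String)) : Decidable (Spec_crop_buckets decisions_or_dict out) := by unfold Spec_crop_buckets; infer_instance

-- ===== CLAIM (what is proved, stated in full; the proofs are below) =====
def Claim_equal_crop_buckets : Prop := ∀ (decisions_or_dict : List (String × List String)), Dom_crop_buckets decisions_or_dict → Spec_crop_buckets decisions_or_dict (crop_buckets decisions_or_dict)

-- ===== LEMMAS AND PROOFS =====

-- A's loop body is exactly "append c to the bucket named by B's classifier"
theorem cbStepA_eq_modify (cats : PySem.Dict String (List String)) (c : String) :
    cbStepA cats c = cats.modify (cbClassify c) [] (· ++ [c]) := by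
  unfold cbStepA cbClassify cbKwTable
  simp only [List.find?, List.any_cons, List.any_nil, Bool.or_false]
  split_ifs with h1 h2 h3 h4 <;> simp only [Bool.not_eq_true] at * <;> simp only [*]

theorem cbClassify_mem (c : String) :
    cbClassify c ∈ ["Rice", "Vegetables", "Fruits", "Spices/Roots", "Other"] := by
  unfold cbClassify
  cases h : cbKwTable.find? (fun p => p.2.any (fun k => PySem.Str.isIn k (PySem.Str.lower c))) with
  | none => simp only [h]; simp
  | some p =>
    simp only [h]
    have hp := List.mem_of_find?_eq_some h
    unfold cbKwTable at hp
    simp only [List.mem_cons, List.not_mem_nil, or_false] at hp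
    rcases hp with rfl | rfl | rfl | rfl <;> simp

-- updating a Set by elements it already contains leaves it unchanged
theorem set_update_subset {α : Type} [DecidableEq α] (s : List α) (l : List α)
    (h : ∀ x ∈ l, x ∈ s) : PySem.Set.update s l = s := by
  induction l generalizing s with
  | nil => rfl
  | cons x t ih =>
    have hx : x ∈ s := h x (by simp)
    have hadd : PySem.Set.add s x = s := by
      simp [PySem.Set.add, PySem.Set.contains, hx]
    calc PySem.Set.update s (x :: t) = PySem.Set.update (PySem.Set.add s x) t := rfl
      _ = s := by rw [hadd]; exact ih s (fun y hy => h y (by simp [hy]))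

-- ===== VERDICT (by name: the statement is the Claim_ definition above) =====
theorem crop_buckets_spec : Claim_equal_crop_buckets := by
  intro d _
  show ((((PySem.Dict.ofList d).getD "crops" []).foldl cbStepA
      (PySem.Dict.ofList [("Rice", []), ("Vegetables", []), ("Fruits", []), ("Spices/Roots", []), ("Other", [])])).items)
    = ["Rice", "Vegetables", "Fruits", "Spices/Roots", "Other"].map
        (fun cat => (cat, ((PySem.Dict.ofList d).getD "crops" []).filter (fun c => cbClassify c == cat)))
  generalize (PySem.Dict.ofList d).getD "crops" [] = crops
  set cats : PySem.Dict String (List String) :=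
    PySem.Dict.ofList [("Rice", []), ("Vegetables", []), ("Fruits", []), ("Spices/Roots", []), ("Other", [])] with hcats
  have hstep : cbStepA = fun d c => d.modify (cbClassify c) [] (· ++ [c]) :=
    funext fun d => funext fun c => cbStepA_eq_modify d c
  rw [hstep]
  have hf := List.foldl_map (f := fun c => (cbClassify c, c))
      (g := fun (d : PySem.Dict String (List String)) (p : String × String) => d.modify p.1 [] (· ++ [p.2]))
      (l := crops) (init := cats)
  beta_reduce at hf
  rw [← hf]
  set res := (crops.map (fun c => (cbClassify c, c))).foldl
      (fun d p => d.modify p.1 [] (· ++ [p.2])) cats with hres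
  have hkeys : res.keys = cats.keys := by
    rw [hres, PySem.Dict.keys_foldl_modify_key (key := fun p : String × String => p.1)]
    apply set_update_subset
    intro x hx
    simp only [List.map_map, List.mem_map] at hx
    obtain ⟨c, _, rfl⟩ := hx
    show cbClassify c ∈ (PySem.Dict.ofList
      [("Rice", ([] : List String)), ("Vegetables", []), ("Fruits", []), ("Spices/Roots", []), ("Other", [])]).keys
    rw [show (PySem.Dict.ofList
        [("Rice", ([] : List String)), ("Vegetables", []), ("Fruits", []), ("Spices/Roots", []), ("Other", [])]).keys
      = ["Rice", "Vegetables", "Fruits", "Spices/Roots", "Other"] from by decide]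
    exact cbClassify_mem c
  have hnodup : res.keys.Nodup := by rw [hkeys]; decide
  have hitems : res.items = res.keys.map (fun k => (k, res.getD k [])) :=
    PySem.Dict.items_eq_map_keys res hnodup []
  have hcats0 : ∀ k, cats.getD k [] = [] := by
    intro k
    have hmk : cats = PySem.Dict.mk
        [("Rice", []), ("Vegetables", []), ("Fruits", []), ("Spices/Roots", []), ("Other", [])] := by decide
    rw [hmk, PySem.Dict.getD_eq_get?_getD]
    simp only [PySem.Dict.get?_mk_cons]
    split_ifs <;> simp [PySem.Dict.get?]
  have hget : ∀ k, res.getD k [] = crops.filter (fun c => cbClassify c == k) := by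
    intro k
    rw [hres, PySem.Dict.getD_foldl_modify_append, hcats0, List.filter_map]
    simp [Function.comp_def]
  have hck : cats.keys = ["Rice", "Vegetables", "Fruits", "Spices/Roots", "Other"] := by decide
  rw [hitems, hkeys, hck]
  simp only [List.map_cons, List.map_nil, hget]
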